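-- pv_equiv track=rewrite | github.com/leeson9394/coding-practice | Facebook/mock_interview.py | get_num_stickers
-- ===== SOURCE A (Python) =====
-- def get_num_stickers(string):
--     kv = {}
--     max_value = 0
--     for c in string:
--         if c in kv:
--             kv[c] += 1
--         else:
--             kv[c] = 1
--
--         # sticker_value = max(kv[c])
--     if "o" in kv.keys():
--         kv["o"] = int(kv["o"] / 2) + (kv["o"] % 2 > 0)
--
--     for item in kv:
--         if max_value < kv[item]:
--             max_value = kv[item]
--
--     return max_value
-- ===== SOURCE B (Python) =====
-- def _adj(c, n):
--     # value of a run: 'o' counts only ceil(n/2) stickers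
--     return -(-n // 2) if c == "o" else n
--
-- def get_num_stickers(string):
--     s = sorted(string)
--     if not s:
--         return 0
--     best = 0
--     cur = s[0]
--     run = 1
--     for c in s[1:]:
--         if c == cur:
--             run += 1
--         else:
--             best = max(best, _adj(cur, run))
--             cur = c
--             run = 1
--     return max(best, _adj(cur, run))
-- ===== Notes on version B (the rewrite author's own statement) =====
-- stated objective: alternative
-- what changed: Replaces the dict-based frequency count (build a counter dict, patch the 'o' entry, then scan the dict for the max) by sorting the string and making one run-length pass over the sorted characters, adjusting an 'o'-run to ceil(n/2) via -(-n//2) and keeping a running maximum.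
import Mathlib
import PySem

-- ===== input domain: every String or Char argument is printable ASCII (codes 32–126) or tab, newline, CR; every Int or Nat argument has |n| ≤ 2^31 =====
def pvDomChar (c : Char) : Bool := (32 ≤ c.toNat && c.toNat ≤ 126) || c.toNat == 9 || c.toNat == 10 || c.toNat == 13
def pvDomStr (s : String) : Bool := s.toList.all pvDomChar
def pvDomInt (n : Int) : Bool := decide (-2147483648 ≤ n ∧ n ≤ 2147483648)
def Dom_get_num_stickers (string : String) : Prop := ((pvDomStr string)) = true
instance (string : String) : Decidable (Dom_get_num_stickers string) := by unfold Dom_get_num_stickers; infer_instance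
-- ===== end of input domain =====

-- B replaces A's dict-based counting by sort + one run-length pass (alternative decomposition, not faster).

-- ===== PORT A =====
def get_num_stickers (string : String) : Int :=
  let kv : PySem.Dict Char Int :=
    string.toList.foldl
      (fun kv c => if kv.contains c then kv.modify c 0 (· + 1) else kv.insert c 1)
      PySem.Dict.empty
  let kv2 : PySem.Dict Char Int :=
    if kv.contains 'o' then
      -- int(kv["o"] / 2): truncation; exact as floor division since the count is ≥ 0
      kv.insert 'o' (PySem.Int.floordiv (kv.getD 'o' 0) 2 +
        (if PySem.Int.mod (kv.getD 'o' 0) 2 > 0 then 1 else 0))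
    else kv
  kv2.keys.foldl
    (fun max_value item =>
      if max_value < kv2.getD item 0 then kv2.getD item 0 else max_value) 0

-- ===== PORT B =====
-- value of a run: an 'o'-run of length n counts only ceil(n/2) = -(-n//2)
def pvAdj (c : Char) (n : Int) : Int :=
  if c = 'o' then -(PySem.Int.floordiv (-n) 2) else n

def pvRunsMax : List Char → Char → Nat → Int → Int
  | [], cur, run, best => max best (pvAdj cur (run : Int))
  | c :: rest, cur, run, best =>
      if c = cur then pvRunsMax rest cur (run + 1) best
      else pvRunsMax rest c 1 (max best (pvAdj cur (run : Int)))

def get_num_stickers_alt (string : String) : Int :=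
  match PySem.List.sorted string.toList (fun x => x) with
  | [] => 0
  | c :: rest => pvRunsMax rest c 1 0

-- ===== PRECONDITION & SPEC =====
def Spec_get_num_stickers (string : String) (out : Int) : Prop := out = get_num_stickers_alt string
instance (string : String) (out : Int) : Decidable (Spec_get_num_stickers string out) := by unfold Spec_get_num_stickers; infer_instance

-- ===== CLAIM (what is proved, stated in full; the proofs are below) =====
def Claim_equal_get_num_stickers : Prop := ∀ (string : String), Dom_get_num_stickers string → Spec_get_num_stickers string (get_num_stickers string)

-- ===== LEMMAS AND PROOFS =====

-- the common value both ports compute: fold of max (adjusted count) over a list of keys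
def pvFg (l : List Char) (ds : List Char) (m : Int) : Int :=
  ds.foldl (fun acc k => max acc (pvAdj k (l.count k : Int))) m

theorem pv_max_if (m v : Int) : (if m < v then v else m) = max m v := by
  rcases lt_or_ge m v with h | h
  · simp [h, max_eq_right h.le]
  · simp [not_lt_of_ge h, max_eq_left h]

theorem pv_ceil_eq (n : Int) :
    PySem.Int.floordiv n 2 + (if PySem.Int.mod n 2 > 0 then 1 else 0)
      = -(PySem.Int.floordiv (-n) 2) := by
  simp only [PySem.Int.floordiv, PySem.Int.mod,
    Int.fdiv_eq_ediv, Int.fmod_eq_emod]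
  split_ifs with h <;> omega

theorem pv_stepA :
    (fun (kv : PySem.Dict Char Int) c =>
        if kv.contains c then kv.modify c 0 (· + 1) else kv.insert c 1)
      = fun (kv : PySem.Dict Char Int) c => kv.insert c (kv.getD c 0 + 1) := by
  funext kv c
  by_cases h : kv.contains c = true
  · simp [h, PySem.Dict.modify]
  · have hf : kv.contains c = false := by simpa using h
    simp [h, PySem.Dict.getD_of_not_contains kv 0 hf]

theorem pv_A_eq_pvFg (s : String) :
    get_num_stickers s = pvFg s.toList (PySem.Set.ofList s.toList) 0 := by
  unfold get_num_stickers
  rw [pv_stepA, PySem.Dict.foldl_insert_getD_add_one_eq_counter]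
  set l := s.toList
  by_cases ho : (PySem.Dict.counter l).contains 'o' = true
  · simp only [ho, if_true]
    rw [PySem.Dict.keys_insert_of_contains _ _ ho, PySem.Dict.keys_counter]
    apply PySem.List.foldl_congr_mem
    intro acc k hk
    rw [pv_max_if, PySem.Dict.getD_insert]
    by_cases hko : k = 'o'
    · subst hko
      rw [if_pos rfl, PySem.Dict.getD_counter]
      unfold pvAdj
      rw [if_pos rfl, pv_ceil_eq]
    · simp [hko, PySem.Dict.getD_counter, pvAdj]
  · rw [Bool.not_eq_true] at ho
    simp only [ho, Bool.false_eq_true, if_false]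
    rw [PySem.Dict.keys_counter]
    apply PySem.List.foldl_congr_mem
    intro acc k hk
    have hkl : k ∈ l := (PySem.Set.mem_ofList l k).mp hk
    have hko : k ≠ 'o' := by
      rintro rfl
      rw [PySem.Dict.contains_counter] at ho
      simp [hkl] at ho
    rw [pv_max_if, PySem.Dict.getD_counter]
    simp [pvAdj, hko]

theorem pv_discard_of_not_mem {x : Char} {s : PySem.Set Char} (h : x ∉ s) :
    s.discard x = s := by
  simp only [PySem.Set.discard]
  apply List.filter_eq_self.mpr
  intro y hy
  simp only [Bool.not_eq_true', beq_eq_false_iff_ne]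
  rintro rfl; exact h hy

theorem pv_discard_cons_self (x : Char) (s : List Char) :
    PySem.Set.discard (x :: s) x = PySem.Set.discard s x := by
  simp [PySem.Set.discard]

theorem pv_discard_idem (x : Char) (s : List Char) :
    PySem.Set.discard (PySem.Set.discard s x) x = PySem.Set.discard s x := by
  simp [PySem.Set.discard, List.filter_filter]

theorem pv_discard_cons_ne {x c : Char} (hne : c ≠ x) (s : List Char) :
    PySem.Set.discard (c :: s) x = c :: PySem.Set.discard s x := by
  simp [PySem.Set.discard, hne]

-- counts in a cons list agree with counts in the tail away from the head
theorem pv_count_cons_ne {k c : Char} (hne : k ≠ c) (rest : List Char) :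
    List.count k (c :: rest) = List.count k rest := by
  simp [Ne.symm hne]

-- absorbing the head of the key list into the fold's accumulator
theorem pv_head_step (c : Char) (rest : List Char) (m : Int) :
    pvFg (c :: rest) (c :: (PySem.Set.ofList rest).discard c) m
      = pvFg rest ((PySem.Set.ofList rest).discard c)
          (max m (pvAdj c ((1 : Int) + rest.count c))) := by
  unfold pvFg
  rw [List.foldl_cons]
  have hcnt : ((c :: rest).count c : Int) = (1 : Int) + rest.count c := by
    simp; ring
  rw [hcnt]
  apply PySem.List.foldl_congr_mem
  intro acc k hk
  have hkc : k ≠ c := ((PySem.Set.mem_discard _ _ _).mp hk).2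
  rw [pv_count_cons_ne hkc]

-- B's run-length scan over a sorted tail computes the fold of adjusted counts
theorem pv_runs : ∀ (s : List Char) (cur : Char) (run : Nat) (best : Int),
    (cur :: s).Pairwise (· ≤ ·) →
    pvRunsMax s cur run best
      = pvFg s ((PySem.Set.ofList s).discard cur)
          (max best (pvAdj cur ((run : Int) + s.count cur)))
  | [], cur, run, best, _ => by
      simp [pvRunsMax, pvFg, PySem.Set.ofList_nil, PySem.Set.discard]
  | c :: rest, cur, run, best, hp => by
      have hptail : (c :: rest).Pairwise (· ≤ ·) := hp.tail
      by_cases hc : c = cur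
      · subst hc
        rw [pvRunsMax, if_pos rfl, pv_runs rest c (run + 1) best hptail]
        have hds : (PySem.Set.ofList (c :: rest)).discard c
            = (PySem.Set.ofList rest).discard c := by
          rw [PySem.Set.ofList_cons, pv_discard_cons_self, pv_discard_idem]
        rw [hds]
        have hcnt : (run : Int) + (c :: rest).count c
            = ((run + 1 : Nat) : Int) + rest.count c := by
          simp; ring
        rw [hcnt]
        unfold pvFg
        apply PySem.List.foldl_congr_mem
        intro acc k hk
        have hkc : k ≠ c := ((PySem.Set.mem_discard _ _ _).mp hk).2
        rw [pv_count_cons_ne hkc]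
      · have hcur_lt : ∀ x ∈ c :: rest, cur < x := by
          have h1 : ∀ x ∈ c :: rest, cur ≤ x := by
            intro x hx; exact (List.pairwise_cons.mp hp).1 x hx
          intro x hx
          rcases List.mem_cons.mp hx with rfl | hx
          · exact lt_of_le_of_ne (h1 x (by simp)) (Ne.symm hc)
          · calc cur < c := lt_of_le_of_ne (h1 c (by simp)) (Ne.symm hc)
              _ ≤ x := (List.pairwise_cons.mp hptail).1 x hx
        have hcur_notmem : cur ∉ c :: rest := fun hmem => lt_irrefl cur (hcur_lt cur hmem)
        rw [pvRunsMax, if_neg hc, pv_runs rest c 1 (max best (pvAdj cur (run : Int))) hptail]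
        have hcnt0 : ((c :: rest).count cur : Int) = 0 := by
          rw [List.count_eq_zero.mpr hcur_notmem]; rfl
        rw [hcnt0, add_zero]
        have hds : (PySem.Set.ofList (c :: rest)).discard cur
            = c :: (PySem.Set.ofList rest).discard c := by
          rw [PySem.Set.ofList_cons, pv_discard_cons_ne hc]
          congr 1
          apply pv_discard_of_not_mem
          intro hm
          exact hcur_notmem (by
            have := ((PySem.Set.mem_discard _ _ _).mp hm).1
            exact List.mem_cons_of_mem c ((PySem.Set.mem_ofList rest cur).mp this))
        rw [hds, pv_head_step]
        norm_num

theorem pv_B_eq_pvFg (s : String) :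
    get_num_stickers_alt s
      = pvFg (PySem.List.sorted s.toList (fun x => x))
          (PySem.Set.ofList (PySem.List.sorted s.toList (fun x => x))) 0 := by
  unfold get_num_stickers_alt
  rcases hsort : PySem.List.sorted s.toList (fun x => x) with _ | ⟨c, rest⟩
  · simp [pvFg, PySem.Set.ofList_nil]
  · have hp : (c :: rest).Pairwise (· ≤ ·) := by
      have h := PySem.List.sorted_pairwise s.toList (fun x => x)
      rw [hsort] at h
      simpa using h
    show pvRunsMax rest c 1 0 = pvFg (c :: rest) (PySem.Set.ofList (c :: rest)) 0
    rw [pv_runs rest c 1 0 hp, PySem.Set.ofList_cons, pv_head_step]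
    norm_num

theorem pv_foldl_max_perm (g : Char → Int) {l₁ l₂ : List Char} (h : l₁.Perm l₂) :
    ∀ b : Int, l₁.foldl (fun acc k => max acc (g k)) b
      = l₂.foldl (fun acc k => max acc (g k)) b := by
  induction h with
  | nil => intro b; rfl
  | cons x _ ih => intro b; simpa using ih _
  | swap x y l => intro b; simp [List.foldl, max_right_comm]
  | trans _ _ ih₁ ih₂ => intro b; rw [ih₁, ih₂]

theorem pv_bridge (s : String) :
    pvFg (PySem.List.sorted s.toList (fun x => x))
        (PySem.Set.ofList (PySem.List.sorted s.toList (fun x => x))) 0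
      = pvFg s.toList (PySem.Set.ofList s.toList) 0 := by
  have hperm : (PySem.List.sorted s.toList (fun x => x)).Perm s.toList :=
    PySem.List.sorted_perm s.toList (fun x => x) false
  have hcnt : ∀ k : Char,
      ((PySem.List.sorted s.toList (fun x => x)).count k : Int) = (s.toList.count k : Int) := by
    intro k; exact_mod_cast hperm.count_eq k
  have h1 : pvFg (PySem.List.sorted s.toList (fun x => x))
      (PySem.Set.ofList (PySem.List.sorted s.toList (fun x => x))) 0
      = pvFg s.toList (PySem.Set.ofList (PySem.List.sorted s.toList (fun x => x))) 0 := by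
    unfold pvFg
    apply PySem.List.foldl_congr_mem
    intro acc k _
    rw [hcnt]
  rw [h1]
  unfold pvFg
  apply pv_foldl_max_perm
  rw [List.perm_ext_iff_of_nodup (PySem.Set.nodup_ofList _) (PySem.Set.nodup_ofList _)]
  intro a
  rw [PySem.Set.mem_ofList, PySem.Set.mem_ofList, PySem.List.mem_sorted]

-- ===== VERDICT (by name: the statement is the Claim_ definition above) =====
theorem get_num_stickers_spec : Claim_equal_get_num_stickers := by
  intro s _
  unfold Spec_get_num_stickers
  rw [pv_A_eq_pvFg, pv_B_eq_pvFg, pv_bridge]
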